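-- pv_equiv track=rewrite | github.com/Vladimir-Cool/Lernin | leetCode/14.5. Longest substring in str list.py | match_checking
-- ===== SOURCE A (Python) =====
-- def match_checking(word1: str, i: int, word2: str, j: int) -> str:
--     chek_str = ""
--     len_iter = min(len(word1) - i, len(word2) - j)
--
--     for z in range(len_iter):
--         if word1[i + z] == word2[j + z]:
--             chek_str += word1[i + z]
--         else:
--             break
--     return chek_str
-- ===== SOURCE B (Python) =====
-- def match_checking(word1: str, i: int, word2: str, j: int) -> str:
--     # Slice both strings at their offsets, locate the first mismatch index
--     # in the zipped pair, and return the prefix up to it in one slice.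
--     s1, s2 = word1[i:], word2[j:]
--     n = min(len(s1), len(s2))
--     k = next((t for t, (a, b) in enumerate(zip(s1, s2)) if a != b), n)
--     return s1[:k]
-- ===== Notes on version B (the rewrite author's own statement) =====
-- stated objective: alternative
-- what changed: B slices both strings at their offsets and returns s1[:k] where k is the first mismatch index found in the zipped slices, instead of A's index-arithmetic loop that accumulates characters one by one with +=.
-- outside the precondition, e.g. on match_checking('aa', -1, 'aa', 0): A returns 'aa', B returns 'a'
import Mathlib
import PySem

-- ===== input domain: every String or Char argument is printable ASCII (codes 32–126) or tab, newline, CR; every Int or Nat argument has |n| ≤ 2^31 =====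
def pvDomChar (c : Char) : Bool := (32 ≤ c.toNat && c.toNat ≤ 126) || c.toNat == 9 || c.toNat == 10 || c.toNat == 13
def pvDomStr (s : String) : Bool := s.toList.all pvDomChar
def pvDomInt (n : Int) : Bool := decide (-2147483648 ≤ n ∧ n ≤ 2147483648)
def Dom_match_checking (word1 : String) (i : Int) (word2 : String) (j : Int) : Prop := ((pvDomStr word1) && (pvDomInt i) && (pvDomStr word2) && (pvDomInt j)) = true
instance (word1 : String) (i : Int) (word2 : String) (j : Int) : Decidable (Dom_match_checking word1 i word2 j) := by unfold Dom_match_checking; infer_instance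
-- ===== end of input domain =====

-- B slices both strings at their offsets and returns the prefix up to the first
-- mismatch index of the zipped slices, replacing A's index-arithmetic loop that
-- accumulates matching characters one by one (objective: alternative).


-- ===== PORT A =====
-- the for-z-in-range loop with its break; a `none` from pyGet? is Python's
-- IndexError (excluded by Pre_), where the port stops with the current acc
def pvLoopA (l1 l2 : List Char) (i j : Int) : List Int → List Char → List Char
  | [], acc => acc
  | z :: zs, acc =>
    match PySem.List.pyGet? l1 (i + z), PySem.List.pyGet? l2 (j + z) with
    | some c1, some c2 =>
        if c1 = c2 then pvLoopA l1 l2 i j zs (acc ++ [c1]) else acc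
    | _, _ => acc

def match_checking (word1 : String) (i : Int) (word2 : String) (j : Int) : String :=
  let l1 := word1.toList
  let l2 := word2.toList
  let lenIter : Int := min ((l1.length : Int) - i) ((l2.length : Int) - j)
  String.ofList (pvLoopA l1 l2 i j (PySem.List.pyRange 0 lenIter 1) [])

-- ===== PORT B =====
-- first index t with s1[t] ≠ s2[t] in the zipped slices (the `next(…)` search)
def pvFirstDiff : List (Char × Char) → Option Nat
  | [] => none
  | (a, b) :: rest => if a ≠ b then some 0 else (pvFirstDiff rest).map (· + 1)

def match_checking_alt (word1 : String) (i : Int) (word2 : String) (j : Int) : String :=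
  let s1 := PySem.List.slice word1.toList (some i) none
  let s2 := PySem.List.slice word2.toList (some j) none
  let n := min s1.length s2.length
  let k := (pvFirstDiff (s1.zip s2)).getD n
  String.ofList (s1.take k)

-- ===== PRECONDITION & SPEC =====
-- Pre_ admits the natural domain of nonnegative offsets, plus every input whose
-- comparison loop is empty (an offset past its string's end); it excludes negative
-- offsets reaching the loop, where A raises IndexError (i < -len(word1)) or reads
-- via Python's negative-index wraparound, an artefact B's slicing does not share.
def Pre_match_checking (word1 : String) (i : Int) (word2 : String) (j : Int) : Prop :=
  (0 ≤ i ∧ 0 ≤ j) ∨ (word1.toList.length : Int) ≤ i ∨ (word2.toList.length : Int) ≤ j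
instance (word1 : String) (i : Int) (word2 : String) (j : Int) : Decidable (Pre_match_checking word1 i word2 j) := by unfold Pre_match_checking; infer_instance
def pvWitness_match_checking : String × Int × String × Int := ("abc", 1, "xbcd", 1)

def Spec_match_checking (word1 : String) (i : Int) (word2 : String) (j : Int) (out : String) : Prop := out = match_checking_alt word1 i word2 j
instance (word1 : String) (i : Int) (word2 : String) (j : Int) (out : String) : Decidable (Spec_match_checking word1 i word2 j out) := by unfold Spec_match_checking; infer_instance

-- ===== CLAIM (what is proved, stated in full; the proofs are below) =====
def Claim_equal_match_checking : Prop := ∀ (word1 : String) (i : Int) (word2 : String) (j : Int), Dom_match_checking word1 i word2 j → Pre_match_checking word1 i word2 j → Spec_match_checking word1 i word2 j (match_checking word1 i word2 j)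

-- ===== LEMMAS AND PROOFS =====
-- the common reference value both ports compute: structural common prefix
def pvCp : List Char → List Char → List Char
  | a :: as, b :: bs => if a = b then a :: pvCp as bs else []
  | _, _ => []

lemma pvLoopA_eq (l1 l2 : List Char) (i j : Int) :
    ∀ (m : Nat) (z : Int) (acc : List Char), 0 ≤ i + z → 0 ≤ j + z →
      m = min (l1.length - (i + z).toNat) (l2.length - (j + z).toNat) →
      pvLoopA l1 l2 i j (PySem.List.pyRange z (z + m) 1) acc
        = acc ++ pvCp (l1.drop (i + z).toNat) (l2.drop (j + z).toNat) := by
  intro m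
  induction m with
  | zero =>
    intro z acc hi hj hm
    rw [show z + (0:Nat) = z by omega, PySem.List.pyRange_one_eq_nil le_rfl]
    have : l1.length ≤ (i + z).toNat ∨ l2.length ≤ (j + z).toNat := by omega
    rcases this with h | h
    · rw [List.drop_eq_nil_of_le h]
      cases l2.drop (j + z).toNat <;> simp [pvLoopA, pvCp]
    · rw [show l2.drop (j + z).toNat = [] from List.drop_eq_nil_of_le h]
      cases l1.drop (i + z).toNat <;> simp [pvLoopA, pvCp]
  | succ m ih =>
    intro z acc hi hj hm
    have h1 : (i + z).toNat < l1.length := by omega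
    have h2 : (j + z).toNat < l2.length := by omega
    have hg1 : PySem.List.pyGet? l1 (i + z) = some l1[(i + z).toNat] :=
      PySem.List.pyGet?_eq_some_getElem l1 hi (by omega)
    have hg2 : PySem.List.pyGet? l2 (j + z) = some l2[(j + z).toNat] :=
      PySem.List.pyGet?_eq_some_getElem l2 hj (by omega)
    rw [PySem.List.pyRange_one_cons (by omega : z < z + (m + 1 : Nat))]
    rw [List.drop_eq_getElem_cons h1, List.drop_eq_getElem_cons h2]
    simp only [pvLoopA, hg1, hg2, pvCp]
    by_cases hc : l1[(i + z).toNat] = l2[(j + z).toNat]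
    · rw [if_pos hc, if_pos hc]
      have hz' : z + (m + 1 : Nat) = (z + 1) + (m : Nat) := by push_cast; ring
      rw [hz', ih (z + 1) (acc ++ [l1[(i + z).toNat]]) (by omega) (by omega) (by omega)]
      have e1 : (i + (z + 1)).toNat = (i + z).toNat + 1 := by omega
      have e2 : (j + (z + 1)).toNat = (j + z).toNat + 1 := by omega
      rw [e1, e2, List.append_assoc]
      rfl
    · rw [if_neg hc, if_neg hc]
      simp

lemma pvFirstDiff_take :
    ∀ (u v : List Char),
      u.take ((pvFirstDiff (u.zip v)).getD (min u.length v.length)) = pvCp u v := by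
  intro u
  induction u with
  | nil => intro v; simp [pvFirstDiff, pvCp]
  | cons a as ih =>
    intro v
    cases v with
    | nil => simp [pvFirstDiff, pvCp]
    | cons b bs =>
      by_cases hc : a = b
      · simp only [List.zip_cons_cons, pvFirstDiff, hc, ne_eq, not_true_eq_false,
          if_false, pvCp]
        simp only [if_true]
        cases h : pvFirstDiff (as.zip bs) with
        | none =>
          have := ih bs
          rw [h] at this
          simp only [Option.map_none, Option.getD_none, List.length_cons]
          rw [show min (as.length + 1) (bs.length + 1) = min as.length bs.length + 1 by omega]
          simp only [List.take_succ_cons]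
          rw [← this]
          simp
        | some t =>
          have := ih bs
          rw [h] at this
          simp only [Option.map_some, Option.getD_some, List.take_succ_cons]
          rw [← this]
          simp
      · simp [pvFirstDiff, pvCp, hc]

-- ===== VERDICT (by name: the statement is the Claim_ definition above) =====
theorem match_checking_spec : Claim_equal_match_checking := by
  intro word1 i word2 j _ hpre
  unfold Spec_match_checking match_checking match_checking_alt
  dsimp only
  rcases hpre with ⟨hi, hj⟩ | hcase
  case inr =>
    refine congrArg String.ofList ?_
    rw [PySem.List.pyRange_one_eq_nil (by omega)]
    rcases hcase with h | h
    · have hs1 : PySem.List.slice word1.toList (some i) none = [] := by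
        rw [PySem.List.slice_from word1.toList (by omega)]
        exact List.drop_eq_nil_of_le (by omega)
      simp [pvLoopA, hs1, pvFirstDiff]
    · have hs2 : PySem.List.slice word2.toList (some j) none = [] := by
        rw [PySem.List.slice_from word2.toList (by omega)]
        exact List.drop_eq_nil_of_le (by omega)
      simp [pvLoopA, hs2, pvFirstDiff]
  simp only [PySem.List.slice_from word1.toList hi, PySem.List.slice_from word2.toList hj]
  rw [pvFirstDiff_take]
  set l1 := word1.toList
  set l2 := word2.toList
  refine congrArg String.ofList ?_
  by_cases hle : min ((l1.length : Int) - i) ((l2.length : Int) - j) ≤ 0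
  · rw [PySem.List.pyRange_one_eq_nil (by omega)]
    have : l1.length ≤ i.toNat ∨ l2.length ≤ j.toNat := by omega
    rcases this with h | h
    · rw [List.drop_eq_nil_of_le h]
      cases l2.drop j.toNat <;> simp [pvLoopA, pvCp]
    · rw [show l2.drop j.toNat = [] from List.drop_eq_nil_of_le h]
      cases l1.drop i.toNat <;> simp [pvLoopA, pvCp]
  · have key := pvLoopA_eq l1 l2 i j (min (l1.length - i.toNat) (l2.length - j.toNat)) 0 []
      (by omega) (by omega) (by omega)
    rw [show (0:Int) + ((min (l1.length - i.toNat) (l2.length - j.toNat) : Nat) : Int)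
        = min ((l1.length : Int) - i) ((l2.length : Int) - j) by omega] at key
    rw [key]
    simp
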